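-- pv_equiv track=rewrite | github.com/ayoubc/competitive-programming | online_judges/hackerrank/algorithms/math/building-a-list.py | solve
-- ===== SOURCE A (Python) =====
-- def solve(n, S):
--     d = {}
--     b = (1 << n)
--     for i in range(1, b):
--         tmp = []
--         for j in range(n):
--             if (1 << j) & i != 0:
--                 tmp.append(S[j])
--
--         s = "".join(tmp)
--         tmp.sort()
--         key = "".join(tmp)
--         d[key] = min(s, d.get(key, s))
--
--     ans = list(d.values())
--     ans.sort()
--     return ans
-- ===== SOURCE B (Python) =====
-- def solve(n, S):
--     d = {}
--
--     def rec(j, chosen):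
--         # walk indices from j down to -1; at each index branch: exclude S[j], then include it
--         if j < 0:
--             if chosen:
--                 s = "".join(chosen)
--                 key = "".join(sorted(chosen))
--                 prev = d.get(key)
--                 d[key] = s if prev is None or s < prev else prev
--             return
--         rec(j - 1, chosen)
--         rec(j - 1, [S[j]] + chosen)
--
--     rec(n - 1, [])
--     return sorted(d.values())
-- ===== Notes on version B (the rewrite author's own statement) =====
-- stated objective: alternative
-- what changed: Replaces the bitmask loop over all 2^n masks (with an inner n-bit scan per mask) by a binary include/exclude recursion over the indices that threads the partial subset, updating the per-sorted-key minimum at the leaves.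
import Mathlib
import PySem

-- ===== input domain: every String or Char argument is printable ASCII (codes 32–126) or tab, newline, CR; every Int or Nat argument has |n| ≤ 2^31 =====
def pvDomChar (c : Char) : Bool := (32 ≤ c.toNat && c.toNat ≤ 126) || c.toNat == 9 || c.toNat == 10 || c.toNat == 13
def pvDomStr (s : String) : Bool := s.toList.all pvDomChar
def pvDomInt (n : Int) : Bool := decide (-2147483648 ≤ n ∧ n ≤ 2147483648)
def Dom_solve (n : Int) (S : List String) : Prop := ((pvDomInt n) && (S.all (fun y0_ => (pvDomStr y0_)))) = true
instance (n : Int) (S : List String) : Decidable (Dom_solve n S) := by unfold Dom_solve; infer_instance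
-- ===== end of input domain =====

-- B replaces A's bitmask loop by an include/exclude recursion over the indices
-- (an alternative decomposition of the same enumeration, same cost).

-- ===== PORT A =====
-- A-side helpers: the inner bit-scan loop ('tmp = [S[j] for set bits j]') and the body of the
-- outer loop, named so the proofs can speak about them; 'solve' is A's code step for step.
-- '1 << n' / '1 << j' are ported as '1 <<< ·.toNat' — exact for the nonnegative shifts
-- Pre_solve admits (Python raises ValueError on a negative shift); 'S[j]' is ported as
-- 'pyGetD S j ""' — exact since Pre_solve requires n ≤ len(S) (Python raises IndexError else).
def tmpA (n : Int) (S : List String) (i : Int) : List String :=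
  (PySem.List.pyRange 0 n 1).foldl
    (fun tmp j =>
      if PySem.Int.band ((1 : Int) <<< j.toNat) i ≠ 0 then tmp ++ [PySem.List.pyGetD S j ""]
      else tmp) []

def bodyA (n : Int) (S : List String) (d : PySem.Dict String String) (i : Int) :
    PySem.Dict String String :=
  let tmp := tmpA n S i
  let s := PySem.Str.join "" tmp
  let tmp := PySem.List.sorted tmp (fun x => x) false
  let key := PySem.Str.join "" tmp
  d.insert key (min s (d.getD key s))

def solve (n : Int) (S : List String) : List String :=
  let d : PySem.Dict String String := PySem.Dict.empty
  let b : Int := (1 : Int) <<< n.toNat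
  let d := (PySem.List.pyRange 1 b 1).foldl (bodyA n S) d
  PySem.List.sorted d.values (fun x => x) false

-- ===== PORT B =====
-- B-side helpers: 'recBase' is the j < 0 leaf of Source B's rec (update the per-key minimum,
-- skipping the empty subset), 'recB k' is rec called with j = k - 1 (fuel k = j + 1; the
-- exclude branch first, then S[j] consed onto 'chosen', exactly Source B's order).
def recBase (chosen : List String) (d : PySem.Dict String String) : PySem.Dict String String :=
  if chosen ≠ [] then
    let s := PySem.Str.join "" chosen
    let key := PySem.Str.join "" (PySem.List.sorted chosen (fun x => x) false)
    let prev := d.get? key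
    d.insert key (match prev with | none => s | some p => if s < p then s else p)
  else d

def recB (S : List String) : Nat → List String → PySem.Dict String String →
    PySem.Dict String String
  | 0, chosen, d => recBase chosen d
  | k + 1, chosen, d =>
      recB S k (PySem.List.pyGetD S (k : Int) "" :: chosen) (recB S k chosen d)

def solve_alt (n : Int) (S : List String) : List String :=
  let d := recB S n.toNat [] PySem.Dict.empty
  PySem.List.sorted d.values (fun x => x) false

-- ===== PRECONDITION & SPEC =====
-- Pre_solve: exactly the inputs on which Python A returns normally — n < 0 makes '1 << n'
-- raise ValueError, and n > len(S) makes 'S[j]' raise IndexError.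
def Pre_solve (n : Int) (S : List String) : Prop := 0 ≤ n ∧ n ≤ (S.length : Int)
instance (n : Int) (S : List String) : Decidable (Pre_solve n S) := by
  unfold Pre_solve; infer_instance

def pvWitness_solve : Int × List String := (2, ["b", "a"])

def Spec_solve (n : Int) (S : List String) (out : List String) : Prop := out = solve_alt n S
instance (n : Int) (S : List String) (out : List String) : Decidable (Spec_solve n S out) := by
  unfold Spec_solve; infer_instance

-- ===== CLAIM (what is proved, stated in full; the proofs are below) =====
def Claim_equal_solve : Prop :=
  ∀ (n : Int) (S : List String), Dom_solve n S → Pre_solve n S → Spec_solve n S (solve n S)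

-- ===== LEMMAS AND PROOFS =====

-- the subset selected by the bits of i below k, as strings of S in index order
def tmpN (S : List String) (k : Nat) (i : Nat) : List String :=
  ((List.range k).filter (fun j => i.testBit j)).map
    (fun (j : Nat) => PySem.List.pyGetD S ((j : Nat) : Int) "")

theorem foldl_ite_append {α β : Type} (p : α → Prop) [DecidablePred p] (f : α → β)
    (l : List α) (acc : List β) :
    l.foldl (fun t j => if p j then t ++ [f j] else t) acc =
      acc ++ (l.filter (fun j => decide (p j))).map f := by
  induction l generalizing acc with
  | nil => simp
  | cons a l ih => by_cases h : p a <;> simp [h, ih]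

theorem band_cond (x : Nat) (i : Int) (hi : 0 ≤ i) :
    (PySem.Int.band ((1 : Int) <<< ((x : Nat) : Int)) i ≠ 0) ↔ i.toNat.testBit x = true := by
  rw [show (1 : Int) <<< ((x : Nat) : Int) = ((2 ^ x : Nat) : Int) from Int.one_shiftLeft x]
  rw [PySem.Int.band_of_nonneg (by positivity) hi]
  simp only [Int.toNat_natCast]
  rw [Nat.two_pow_and]
  rcases h : i.toNat.testBit x with _ | _ <;> simp [h, pow_ne_zero]

theorem tmpA_eq_tmpN (n : Int) (S : List String) (i : Int) (hi : 0 ≤ i) :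
    tmpA n S i = tmpN S n.toNat i.toNat := by
  unfold tmpA tmpN
  rw [show PySem.List.pyRange 0 n 1 = (List.range n.toNat).map (fun k : Nat => (k : Int)) by
        simpa using PySem.List.pyRange_one 0 n]
  rw [List.foldl_map]
  rw [foldl_ite_append]
  simp only [List.nil_append]
  congr 1
  apply List.filter_congr
  intro j _
  simp only [Int.toNat_natCast]
  simp [band_cond j i hi]

theorem tmpN_zero_bits (S : List String) (k : Nat) : tmpN S k 0 = [] := by
  simp [tmpN]

theorem tmpN_ne_nil (S : List String) (k : Nat) (i : Nat) (h1 : 1 ≤ i) (h2 : i < 2 ^ k) :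
    tmpN S k i ≠ [] := by
  unfold tmpN
  simp only [ne_eq, List.map_eq_nil_iff, List.filter_eq_nil_iff]
  intro hall
  have hz : i = 0 := by
    apply Nat.eq_of_testBit_eq
    intro j
    simp only [Nat.zero_testBit]
    by_cases hj : j < k
    · have := hall j (by simpa using hj)
      simpa using this
    · exact Nat.testBit_lt_two_pow
        (lt_of_lt_of_le h2 (Nat.pow_le_pow_right (by omega) (by omega)))
  omega

theorem tmpN_succ_low (S : List String) (k i : Nat) (h : i < 2 ^ k) :
    tmpN S (k + 1) i = tmpN S k i := by
  unfold tmpN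
  rw [List.range_succ, List.filter_append]
  have he : List.filter (fun j => i.testBit j) [k] = [] := by
    simp [Nat.testBit_lt_two_pow h]
  rw [he, List.append_nil]

theorem tmpN_succ_high (S : List String) (k i : Nat) (h : i < 2 ^ k) :
    tmpN S (k + 1) (2 ^ k + i) = tmpN S k i ++ [PySem.List.pyGetD S ((k : Nat) : Int) ""] := by
  unfold tmpN
  rw [List.range_succ, List.filter_append, List.map_append]
  congr 1
  · congr 1
    apply List.filter_congr
    intro j hj
    rw [Nat.testBit_two_pow_add_gt (List.mem_range.mp hj)]
  · have hk : (2 ^ k + i).testBit k = true := by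
      rw [Nat.testBit_two_pow_add_eq, Nat.testBit_lt_two_pow h]
      rfl
    simp [hk]

-- A's per-mask update 'd[key] = min(s, d.get(key, s))' equals B's leaf update on a
-- non-empty subset (min returns its first argument on ties, like Python's min)
theorem bodyA_eq_recBase (n : Int) (S : List String) (d : PySem.Dict String String) (i : Int)
    (h : tmpA n S i ≠ []) : bodyA n S d i = recBase (tmpA n S i) d := by
  simp only [bodyA, recBase]
  rw [if_pos h]
  rw [PySem.Dict.getD_eq_get?_getD]
  cases hp : d.get? (PySem.Str.join "" (PySem.List.sorted (tmpA n S i) (fun x => x) false)) with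
  | none => simp
  | some p =>
      simp only [Option.getD_some]
      congr 1
      rcases lt_trichotomy (PySem.Str.join "" (tmpA n S i)) p with hlt | heq | hgt
      · rw [min_eq_left hlt.le, if_pos hlt]
      · rw [heq]
        simp
      · rw [min_eq_right hgt.le, if_neg (not_lt.mpr hgt.le)]

-- the core: folding B's leaf update over all i < 2^k in counting order, with the partial
-- subset 'chosen' fixed, IS Source B's exclude-first depth-first recursion
theorem foldl_eq_recB (S : List String) (k : Nat) (chosen : List String)
    (d : PySem.Dict String String) :
    (List.range (2 ^ k)).foldl (fun d i => recBase (tmpN S k i ++ chosen) d) d =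
      recB S k chosen d := by
  induction k generalizing chosen d with
  | zero =>
      simp [recB, tmpN]
  | succ k ih =>
      have hsplit : List.range (2 ^ (k + 1)) =
          List.range (2 ^ k) ++ (List.range (2 ^ k)).map (2 ^ k + ·) := by
        rw [← List.range_add]
        congr 1
        ring
      rw [hsplit, List.foldl_append, List.foldl_map]
      have hlow : (List.range (2 ^ k)).foldl
          (fun d i => recBase (tmpN S (k + 1) i ++ chosen) d) d = recB S k chosen d := by
        rw [← ih chosen d]
        apply PySem.List.foldl_congr_mem
        intro acc x hx
        rw [tmpN_succ_low S k x (List.mem_range.mp hx)]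
      rw [hlow]
      have hhigh : (List.range (2 ^ k)).foldl
          (fun d i => recBase (tmpN S (k + 1) (2 ^ k + i) ++ chosen) d) (recB S k chosen d) =
          recB S k (PySem.List.pyGetD S ((k : Nat) : Int) "" :: chosen) (recB S k chosen d) := by
        rw [← ih (PySem.List.pyGetD S ((k : Nat) : Int) "" :: chosen) (recB S k chosen d)]
        apply PySem.List.foldl_congr_mem
        intro acc x hx
        rw [tmpN_succ_high S k x (List.mem_range.mp hx), List.append_assoc,
          List.singleton_append]
      rw [hhigh]
      rfl

-- the two dictionaries are equal
theorem dicts_eq (n : Int) (S : List String) :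
    (PySem.List.pyRange 1 ((1 : Int) <<< n.toNat) 1).foldl (bodyA n S) PySem.Dict.empty =
      recB S n.toNat [] PySem.Dict.empty := by
  rw [show (1 : Int) <<< n.toNat = ((2 ^ n.toNat : Nat) : Int) by
    rw [Int.shiftLeft_eq]; push_cast; ring]
  have h1 : (PySem.List.pyRange 1 ((2 ^ n.toNat : Nat) : Int) 1).foldl (bodyA n S)
      PySem.Dict.empty =
      (PySem.List.pyRange 1 ((2 ^ n.toNat : Nat) : Int) 1).foldl
        (fun d i => recBase (tmpN S n.toNat i.toNat) d) PySem.Dict.empty := by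
    apply PySem.List.foldl_congr_mem
    intro acc i hi
    rcases PySem.List.mem_pyRange_one.mp hi with ⟨hi1, hi2⟩
    have hi0 : 0 ≤ i := by omega
    have ht := tmpA_eq_tmpN n S i hi0
    have hne : tmpA n S i ≠ [] := by
      rw [ht]
      apply tmpN_ne_nil S n.toNat i.toNat (by omega)
      have : i < ((2 ^ n.toNat : Nat) : Int) := hi2
      omega
    rw [bodyA_eq_recBase n S acc i hne, ht]
  rw [h1]
  have h2 : (PySem.List.pyRange 0 ((2 ^ n.toNat : Nat) : Int) 1).foldl
      (fun d i => recBase (tmpN S n.toNat i.toNat) d) PySem.Dict.empty =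
      (PySem.List.pyRange 1 ((2 ^ n.toNat : Nat) : Int) 1).foldl
        (fun d i => recBase (tmpN S n.toNat i.toNat) d) PySem.Dict.empty := by
    rw [PySem.List.pyRange_one_cons (by positivity), List.foldl_cons]
    congr 1
    show recBase (tmpN S n.toNat ((0 : Int)).toNat) PySem.Dict.empty = PySem.Dict.empty
    rw [show ((0 : Int)).toNat = 0 from rfl, tmpN_zero_bits]
    simp [recBase]
  rw [← h2]
  rw [show PySem.List.pyRange 0 ((2 ^ n.toNat : Nat) : Int) 1 =
        (List.range (2 ^ n.toNat)).map (fun k : Nat => (k : Int)) by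
      simpa using PySem.List.pyRange_one 0 ((2 ^ n.toNat : Nat) : Int)]
  rw [List.foldl_map]
  have h3 := foldl_eq_recB S n.toNat [] PySem.Dict.empty
  simp only [List.append_nil] at h3
  rw [← h3]
  apply PySem.List.foldl_congr_mem
  intro acc x _
  rw [Int.toNat_natCast]

-- ===== VERDICT (by name: the statement is the Claim_ definition above) =====
theorem solve_spec : Claim_equal_solve := by
  intro n S _ _
  unfold Spec_solve
  show PySem.List.sorted
      ((PySem.List.pyRange 1 ((1 : Int) <<< n.toNat) 1).foldl (bodyA n S)
        PySem.Dict.empty).values (fun x => x) false =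
    PySem.List.sorted (recB S n.toNat [] PySem.Dict.empty).values (fun x => x) false
  rw [dicts_eq]
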